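-- pv_equiv track=rewrite | github.com/vidit-maheshwari/UltronAI | Agents/web_search.py | _extract_search_results
-- ===== SOURCE A (Python) =====
-- from typing import Dict, Any, List, Optional
--
-- def _extract_search_results(content: str) -> List[Dict[str, Any]]:
--     """Extract structured search results from agent response."""
--     results = []
--
--     # Simple extraction - look for URLs and titles in the content
--     lines = content.split('\n')
--     current_result = {}
--
--     for line in lines:
--         line = line.strip()
--         if line.startswith('http'):
--             if current_result:
--                 results.append(current_result)
--             current_result = {'url': line, 'title': '', 'snippet': ''}
--         elif line and current_result and not current_result.get('title'):
--             current_result['title'] = line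
--         elif line and current_result and current_result.get('title'):
--             current_result['snippet'] = line
--             results.append(current_result)
--             current_result = {}
--
--     if current_result:
--         results.append(current_result)
--
--     return results
-- ===== SOURCE B (Python) =====
-- from typing import Dict, Any, List
--
-- def _extract_search_results(content: str) -> List[Dict[str, Any]]:
--     """Extract structured search results: group lines into blocks at 'http' lines."""
--     lines = [l.strip() for l in content.split('\n')]
--     while lines and not lines[0].startswith('http'):
--         lines.pop(0)
--     results = []
--     while lines:
--         url = lines.pop(0)
--         block = []
--         while lines and not lines[0].startswith('http'):
--             block.append(lines.pop(0))
--         body = [l for l in block if l]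
--         results.append({
--             'url': url,
--             'title': body[0] if body else '',
--             'snippet': body[1] if len(body) > 1 else '',
--         })
--     return results
-- ===== Notes on version B (the rewrite author's own statement) =====
-- stated objective: simpler
-- what changed: Replaces A's incremental state machine (a mutable current_result dict threaded through the line loop with three interacting branches) by a group-first decomposition: drop lines before the first 'http' line, split the rest into blocks at 'http' lines, and map each block to a record whose title/snippet are the first two non-empty lines.
import Mathlib
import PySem

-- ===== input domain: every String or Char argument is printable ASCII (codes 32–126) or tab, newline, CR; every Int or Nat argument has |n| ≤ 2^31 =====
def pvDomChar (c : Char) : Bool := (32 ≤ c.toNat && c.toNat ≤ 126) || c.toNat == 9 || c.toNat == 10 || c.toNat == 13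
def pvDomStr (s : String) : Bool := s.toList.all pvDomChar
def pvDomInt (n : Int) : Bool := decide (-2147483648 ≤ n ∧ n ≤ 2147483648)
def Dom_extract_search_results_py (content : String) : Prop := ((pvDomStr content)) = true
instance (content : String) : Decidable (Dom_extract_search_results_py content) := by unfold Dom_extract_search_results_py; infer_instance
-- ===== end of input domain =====

-- B replaces A's incremental state machine with a group-first decomposition (segment the lines
-- into blocks at 'http' lines, then map each block to a record); objective: simpler, not faster.

-- ===== PORT A =====
-- loop state: (results, current_result); current_result is the Python dict
def pvStepA (st : List (List (String × String)) × PySem.Dict String String) (line0 : String) :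
    List (List (String × String)) × PySem.Dict String String :=
  let line := PySem.Str.strip line0
  if PySem.Str.startswith line "http" then
    let results := if st.2.items ≠ [] then st.1 ++ [st.2.items] else st.1
    (results, PySem.Dict.insert (PySem.Dict.insert (PySem.Dict.insert ⟨[]⟩ "url" line) "title" "") "snippet" "")
  else if line ≠ "" ∧ st.2.items ≠ [] ∧ (PySem.Dict.get? st.2 "title").getD "" = "" then
    -- current_result['title'] = line
    (st.1, PySem.Dict.insert st.2 "title" line)
  else if line ≠ "" ∧ st.2.items ≠ [] ∧ (PySem.Dict.get? st.2 "title").getD "" ≠ "" then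
    -- current_result['snippet'] = line; results.append(current_result); current_result = {}
    (st.1 ++ [(PySem.Dict.insert st.2 "snippet" line).items], ⟨[]⟩)
  else
    st

def extract_search_results_py (content : String) : List (List (String × String)) :=
  let st := ((PySem.Str.split? content "\n").getD []).foldl pvStepA ([], ⟨[]⟩)
  if st.2.items ≠ [] then st.1 ++ [st.2.items] else st.1

-- ===== PORT B =====
-- one record per block: url line, then the first two non-empty lines as title/snippet
def pvMkRec (url : String) (body : List String) : List (String × String) :=
  [("url", url), ("title", body.headD ""), ("snippet", body.getD 1 "")]

def pvNotHttp (l : String) : Bool := ! PySem.Str.startswith l "http"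

def pvBlocksB : List String → List (List (String × String))
  | [] => []
  | url :: rest =>
    pvMkRec url ((rest.takeWhile pvNotHttp).filter (· ≠ "")) :: pvBlocksB (rest.dropWhile pvNotHttp)
termination_by ls => ls.length
decreasing_by
  simpa using Nat.lt_succ_of_le (List.length_dropWhile_le pvNotHttp rest)

def extract_search_results_py_alt (content : String) : List (List (String × String)) :=
  pvBlocksB ((((PySem.Str.split? content "\n").getD []).map PySem.Str.strip).dropWhile pvNotHttp)

-- ===== PRECONDITION & SPEC =====
def Spec_extract_search_results_py (content : String) (out : List (List (String × String))) : Prop := out = extract_search_results_py_alt content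
instance (content : String) (out : List (List (String × String))) : Decidable (Spec_extract_search_results_py content out) := by unfold Spec_extract_search_results_py; infer_instance

-- ===== CLAIM (what is proved, stated in full; the proofs are below) =====
def Claim_equal_extract_search_results_py : Prop := ∀ (content : String), Dom_extract_search_results_py content → Spec_extract_search_results_py content (extract_search_results_py content)

-- ===== LEMMAS AND PROOFS =====

-- pvStepA with the strip factored out (A's fold over raw lines equals this fold over stripped lines)
def pvStep' (st : List (List (String × String)) × PySem.Dict String String) (line : String) :
    List (List (String × String)) × PySem.Dict String String :=
  if PySem.Str.startswith line "http" then
    let results := if st.2.items ≠ [] then st.1 ++ [st.2.items] else st.1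
    (results, PySem.Dict.insert (PySem.Dict.insert (PySem.Dict.insert ⟨[]⟩ "url" line) "title" "") "snippet" "")
  else if line ≠ "" ∧ st.2.items ≠ [] ∧ (PySem.Dict.get? st.2 "title").getD "" = "" then
    (st.1, PySem.Dict.insert st.2 "title" line)
  else if line ≠ "" ∧ st.2.items ≠ [] ∧ (PySem.Dict.get? st.2 "title").getD "" ≠ "" then
    (st.1 ++ [(PySem.Dict.insert st.2 "snippet" line).items], ⟨[]⟩)
  else
    st

def pvFin (st : List (List (String × String)) × PySem.Dict String String) :
    List (List (String × String)) :=
  if st.2.items ≠ [] then st.1 ++ [st.2.items] else st.1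

def pvC0 (u : String) : PySem.Dict String String := ⟨[("url", u), ("title", ""), ("snippet", "")]⟩

def pvC1 (u t : String) : PySem.Dict String String := ⟨[("url", u), ("title", t), ("snippet", "")]⟩

lemma pvStep'_http (st : List (List (String × String)) × PySem.Dict String String) (v : String)
    (hv : PySem.Str.startswith v "http" = true) :
    pvStep' st v = (if st.2.items ≠ [] then st.1 ++ [st.2.items] else st.1, pvC0 v) := by
  have hv' : PySem.Chars.startswith v.toList ['h','t','t','p'] = true := by
    simpa [show ("http" : String).toList = ['h','t','t','p'] from rfl] using hv
  simp [pvStep', hv', pvC0, PySem.Dict.insert, PySem.Dict.contains]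

lemma pvStep'_nil (st : List (List (String × String)) × PySem.Dict String String) :
    pvStep' st "" = st := by
  simp [pvStep', show (("" : String).toList) = [] from rfl, PySem.Chars.startswith]

-- processing non-http lines with empty current does nothing
lemma pvFold_empty (bl : List String) (res : List (List (String × String)))
    (h : ∀ l ∈ bl, pvNotHttp l = true) :
    bl.foldl pvStep' (res, ⟨[]⟩) = (res, ⟨[]⟩) := by
  induction bl with
  | nil => rfl
  | cons l bl ih =>
    have hl := h l (List.mem_cons_self)
    simp only [List.foldl_cons]
    rw [show pvStep' (res, ⟨[]⟩) l = (res, ⟨[]⟩) by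
      simp [pvNotHttp] at hl; simp [pvStep', hl]]
    exact ih (fun x hx => h x (List.mem_cons_of_mem _ hx))

-- with current = full record (title already set): next non-empty line closes the record
lemma pvFold_c1 (bl : List String) (res : List (List (String × String))) (u t : String)
    (ht : t ≠ "") (h : ∀ l ∈ bl, pvNotHttp l = true) :
    bl.foldl pvStep' (res, pvC1 u t) =
      match bl.filter (· ≠ "") with
      | [] => (res, pvC1 u t)
      | s :: _ => (res ++ [[("url", u), ("title", t), ("snippet", s)]], ⟨[]⟩) := by
  induction bl generalizing res with
  | nil => rfl
  | cons l bl ih =>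
    have hl := h l (List.mem_cons_self)
    have hrest : ∀ x ∈ bl, pvNotHttp x = true := fun x hx => h x (List.mem_cons_of_mem _ hx)
    simp [pvNotHttp] at hl
    by_cases he : l = ""
    · subst he
      simp only [List.foldl_cons]
      rw [pvStep'_nil (res, pvC1 u t)]
      rw [ih res hrest]
      simp
    · simp only [List.foldl_cons]
      rw [show pvStep' (res, pvC1 u t) l =
            (res ++ [[("url", u), ("title", t), ("snippet", l)]], ⟨[]⟩) by
        simp [pvStep', hl, he, ht, pvC1, PySem.Dict.get?, PySem.Dict.insert, PySem.Dict.contains]]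
      rw [pvFold_empty bl _ hrest]
      have hfc : (l :: bl).filter (· ≠ "") = l :: bl.filter (· ≠ "") := by
        simp [he]
      rw [hfc]

-- with current = url-only record: first non-empty line becomes the title, second the snippet
lemma pvFold_c0 (bl : List String) (res : List (List (String × String))) (u : String)
    (h : ∀ l ∈ bl, pvNotHttp l = true) :
    bl.foldl pvStep' (res, pvC0 u) =
      match bl.filter (· ≠ "") with
      | [] => (res, pvC0 u)
      | [t] => (res, pvC1 u t)
      | t :: s :: _ => (res ++ [[("url", u), ("title", t), ("snippet", s)]], ⟨[]⟩) := by
  induction bl generalizing res with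
  | nil => rfl
  | cons l bl ih =>
    have hl := h l (List.mem_cons_self)
    have hrest : ∀ x ∈ bl, pvNotHttp x = true := fun x hx => h x (List.mem_cons_of_mem _ hx)
    simp [pvNotHttp] at hl
    by_cases he : l = ""
    · subst he
      simp only [List.foldl_cons]
      rw [pvStep'_nil (res, pvC0 u)]
      rw [ih res hrest]
      simp
    · simp only [List.foldl_cons]
      rw [show pvStep' (res, pvC0 u) l = (res, pvC1 u l) by
        simp [pvStep', hl, he, pvC0, pvC1, PySem.Dict.get?, PySem.Dict.insert, PySem.Dict.contains]]
      rw [pvFold_c1 bl res u l he hrest]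
      have hfc : (l :: bl).filter (· ≠ "") = l :: bl.filter (· ≠ "") := by
        simp [he]
      rw [hfc]
      cases hf : bl.filter (· ≠ "") <;> simp

-- main lemma: starting a block at url u (current = url-only record) yields pvBlocksB (u :: ls)
lemma pvKey (ls : List String) (res : List (List (String × String))) (u : String) :
    pvFin (ls.foldl pvStep' (res, pvC0 u)) = res ++ pvBlocksB (u :: ls) := by
  induction hn : ls.length using Nat.strong_induction_on generalizing ls res u with
  | _ n ih =>
  subst hn
  have hbl : ∀ l ∈ ls.takeWhile pvNotHttp, pvNotHttp l = true :=
    fun l hl => List.mem_takeWhile_imp hl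
  rw [pvBlocksB]
  conv_lhs => rw [show ls = ls.takeWhile pvNotHttp ++ ls.dropWhile pvNotHttp from
    (List.takeWhile_append_dropWhile).symm]
  rw [List.foldl_append, pvFold_c0 _ res u hbl]
  cases hdw : ls.dropWhile pvNotHttp with
  | nil =>
    cases hf : (ls.takeWhile pvNotHttp).filter (· ≠ "") with
    | nil => simp [pvFin, pvC0, pvMkRec, pvBlocksB]
    | cons t rest =>
      cases rest with
      | nil => simp [pvFin, pvC1, pvMkRec, pvBlocksB]
      | cons s rest2 => simp [pvFin, pvMkRec, pvBlocksB]
  | cons v rest3 =>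
    have hvhttp : PySem.Str.startswith v "http" = true := by
      have := List.head_dropWhile_not (l := ls) (p := pvNotHttp) (by simp [hdw])
      simp [hdw, pvNotHttp] at this
      exact this
    have hlen : rest3.length < ls.length := by
      have h1 : (ls.dropWhile pvNotHttp).length ≤ ls.length := List.length_dropWhile_le _ _
      rw [hdw] at h1; simp at h1; omega
    cases hf : (ls.takeWhile pvNotHttp).filter (· ≠ "") with
    | nil =>
      simp only [List.foldl_cons]
      rw [pvStep'_http _ v hvhttp, if_pos (show (pvC0 u).items ≠ [] by simp [pvC0]),
        ih rest3.length hlen rest3 _ v rfl]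
      simp [pvMkRec, pvC0]
    | cons t rest =>
      cases rest with
      | nil =>
        simp only [List.foldl_cons]
        rw [pvStep'_http _ v hvhttp, if_pos (show (pvC1 u t).items ≠ [] by simp [pvC1]),
          ih rest3.length hlen rest3 _ v rfl]
        simp [pvMkRec, pvC1]
      | cons s rest2 =>
        simp only [List.foldl_cons]
        rw [pvStep'_http _ v hvhttp, if_neg (show ¬((⟨[]⟩ : PySem.Dict String String).items ≠ []) by simp),
          ih rest3.length hlen rest3 _ v rfl]
        simp [pvMkRec]

lemma pvTop (ls : List String) :
    pvFin (ls.foldl pvStep' ([], ⟨[]⟩)) = pvBlocksB (ls.dropWhile pvNotHttp) := by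
  have hbl : ∀ l ∈ ls.takeWhile pvNotHttp, pvNotHttp l = true :=
    fun l hl => List.mem_takeWhile_imp hl
  conv_lhs => rw [show ls = ls.takeWhile pvNotHttp ++ ls.dropWhile pvNotHttp from
    (List.takeWhile_append_dropWhile).symm]
  rw [List.foldl_append, pvFold_empty _ _ hbl]
  cases hdw : ls.dropWhile pvNotHttp with
  | nil => simp [pvFin, pvBlocksB]
  | cons v rest3 =>
    have hvhttp : PySem.Str.startswith v "http" = true := by
      have := List.head_dropWhile_not (l := ls) (p := pvNotHttp) (by simp [hdw])
      simp [hdw, pvNotHttp] at this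
      exact this
    simp only [List.foldl_cons]
    rw [pvStep'_http _ v hvhttp]
    simpa using pvKey rest3 [] v

-- ===== VERDICT (by name: the statement is the Claim_ definition above) =====
theorem extract_search_results_py_spec : Claim_equal_extract_search_results_py := by
  intro content _
  unfold Spec_extract_search_results_py extract_search_results_py extract_search_results_py_alt
  simp only []
  rw [show ((PySem.Str.split? content "\n").getD []).foldl pvStepA ([], ⟨[]⟩) =
        (((PySem.Str.split? content "\n").getD []).map PySem.Str.strip).foldl pvStep' ([], ⟨[]⟩) by
    rw [List.foldl_map]; rfl]
  exact pvTop _
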